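-- pv_equiv track=rewrite | github.com/jmforsythe/Advent-Of-Code-2022 | 6.py | do_thing
-- ===== SOURCE A (Python) =====
-- def do_thing(data, num):
--     i = 0
--     s = []
--     for c in data:
--         if len(s) == num:
--             break
--         elif c in s:
--             k = s.index(c)
--             s = s[k+1:]
--         s.append(c)
--         i += 1
--     return i
-- ===== SOURCE B (Python) =====
-- def do_thing(data, num):
--     n = len(data)
--     for i in range(max(num, 0), n + 1):
--         if len(set(data[i - num:i])) == num:
--             return i
--     return n
-- ===== Notes on version B (the rewrite author's own statement) =====
-- stated objective: simpler
-- what changed: A runs one incremental scan maintaining a deduplicated window list (membership test, list.index and a slice per character); B keeps no state at all: it just tries each candidate end position i and tests the fixed-size slice data[i-num:i] for distinctness with set(), returning the first hit.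
import Mathlib
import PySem

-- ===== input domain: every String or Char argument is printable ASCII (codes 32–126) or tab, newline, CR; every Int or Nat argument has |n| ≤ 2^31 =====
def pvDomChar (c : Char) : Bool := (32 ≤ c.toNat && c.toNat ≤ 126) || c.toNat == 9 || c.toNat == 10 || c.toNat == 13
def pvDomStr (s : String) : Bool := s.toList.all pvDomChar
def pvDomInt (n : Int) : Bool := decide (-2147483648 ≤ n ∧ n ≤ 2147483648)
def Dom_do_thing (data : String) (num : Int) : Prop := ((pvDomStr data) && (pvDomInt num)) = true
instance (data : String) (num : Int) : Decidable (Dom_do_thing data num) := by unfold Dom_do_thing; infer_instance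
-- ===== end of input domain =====

-- B replaces A's incremental deduplicated-window scan by a stateless search: it tries each
-- candidate end position and tests the slice of the last num characters for distinctness
-- with set(); equality of the returned value is proved.

-- ===== PORT A =====
-- the for-loop of A: state (i, s); the break is the early return
def do_thing_go (num : Int) (cs : List Char) (i : Int) (s : List Char) : Int :=
  match cs with
  | [] => i
  | c :: rest =>
    if (s.length : Int) = num then i
    else
      let s1 := if s.contains c then
          match PySem.List.index? s c with
          | some k => PySem.List.slice s (some ((k : Int) + 1)) none   -- s = s[k+1:]
          | none => s                                                   -- unreachable (guarded by `c in s`)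
        else s
      do_thing_go num rest (i + 1) (s1 ++ [c])

def do_thing (data : String) (num : Int) : Int :=
  do_thing_go num data.toList 0 []

-- ===== PORT B =====
-- the for-loop of B over range(num, n+1): first i whose window data[i-num:i] has num distinct chars
def do_thing_alt_go (cs : List Char) (num n : Int) (idxs : List Int) : Int :=
  match idxs with
  | [] => n
  | i :: rest =>
    if PySem.Set.len (PySem.Set.ofList (PySem.List.slice cs (some (i - num)) (some i))) = num
    then i
    else do_thing_alt_go cs num n rest

def do_thing_alt (data : String) (num : Int) : Int :=
  let n : Int := PySem.Str.len data
  do_thing_alt_go data.toList num n (PySem.List.pyRange (max num 0) (n + 1) 1)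

-- ===== PRECONDITION & SPEC =====
def Spec_do_thing (data : String) (num : Int) (out : Int) : Prop := out = do_thing_alt data num
instance (data : String) (num : Int) (out : Int) : Decidable (Spec_do_thing data num out) := by unfold Spec_do_thing; infer_instance

-- ===== CLAIM (what is proved, stated in full; the proofs are below) =====
def Claim_equal_do_thing : Prop := ∀ (data : String) (num : Int), Dom_do_thing data num → Spec_do_thing data num (do_thing data num)

-- ===== LEMMAS AND PROOFS =====

-- with a negative num A's break test never fires: the loop consumes all of cs
lemma do_thing_go_neg (num : Int) (hnum : num < 0) (cs : List Char) :
    ∀ (i : Int) (s : List Char), do_thing_go num cs i s = i + cs.length := by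
  induction cs with
  | nil => intro i s; simp [do_thing_go]
  | cons c rest ih =>
    intro i s
    rw [do_thing_go, if_neg (by omega)]
    rw [ih]
    simp only [List.length_cons]
    push_cast
    ring

-- with a negative num B's distinctness test never fires either
lemma do_thing_alt_go_neg (cs : List Char) (num n : Int) (hnum : num < 0) (idxs : List Int) :
    do_thing_alt_go cs num n idxs = n := by
  induction idxs with
  | nil => rfl
  | cons i rest ih =>
    rw [do_thing_alt_go, if_neg (by simp [PySem.Set.len]; omega), ih]

-- a list with a repetition loses length under set()
lemma len_ofList_lt_of_not_nodup (l : List Char) (h : ¬ l.Nodup) :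
    (PySem.Set.ofList l).length < l.length := by
  have h1 : (PySem.Set.ofList l).toFinset = l.toFinset := by
    ext x
    simp [List.mem_toFinset, PySem.Set.mem_ofList]
  have h2 : (PySem.Set.ofList l).length = l.dedup.length := by
    rw [← List.toFinset_card_of_nodup (PySem.Set.nodup_ofList l), h1, List.card_toFinset]
  rw [h2]
  rcases Nat.lt_or_ge l.dedup.length l.length with hlt | hge
  · exact hlt
  · exact absurd (List.dedup_eq_self.mp
      ((List.dedup_sublist l).eq_of_length (le_antisymm ((List.dedup_sublist l).length_le) hge))) h

-- a candidate whose window is not distinct is skipped by B's loop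
lemma alt_go_shift (data : List Char) (num n i : Int)
    (hcond : ¬ PySem.Set.len (PySem.Set.ofList
        (PySem.List.slice data (some (i - num)) (some i))) = num)
    (hi : i < n + 1) :
    do_thing_alt_go data num n (PySem.List.pyRange i (n + 1) 1)
      = do_thing_alt_go data num n (PySem.List.pyRange (i + 1) (n + 1) 1) := by
  rw [PySem.List.pyRange_one_cons hi, do_thing_alt_go, if_neg hcond]

-- when A's maximal distinct suffix s of the processed prefix p is shorter than num,
-- the window of the last num characters of p contains the duplicated pair d, d — B skips it
lemma cond_false_at (data p s tail t' : List Char) (d : Char) (num : Int)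
    (hdata : data = p ++ tail) (hpd : p = t' ++ d :: s) (hdm : d ∈ s)
    (h0 : 0 ≤ num) (hni : num ≤ (p.length : Int)) (hslen : (s.length : Int) < num) :
    ¬ PySem.Set.len (PySem.Set.ofList (PySem.List.slice data
        (some ((p.length : Int) - num)) (some (p.length : Int)))) = num := by
  have hplen : p.length = t'.length + s.length + 1 := by rw [hpd]; simp; omega
  have ha : (p.length : Int) - num = ((p.length - num.toNat : Nat) : Int) := by omega
  have hb : (p.length : Int) = ((p.length : Nat) : Int) := rfl
  rw [ha, hb, PySem.List.slice_natCast]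
  have hle : p.length - num.toNat ≤ p.length := Nat.sub_le _ _
  have hd2 : List.drop (p.length - num.toNat) data
      = List.drop (p.length - num.toNat) p ++ tail := by
    rw [hdata]; exact List.drop_append_of_le_length hle
  have htk : List.take (p.length - (p.length - num.toNat))
      (List.drop (p.length - num.toNat) p ++ tail) = List.drop (p.length - num.toNat) p := by
    have : p.length - (p.length - num.toNat) = (List.drop (p.length - num.toNat) p).length := by
      rw [List.length_drop]
    rw [this, List.take_left]
  rw [hd2, htk]
  have hnn : ¬ (List.drop (p.length - num.toNat) p).Nodup := by
    intro hnd
    have hsub : (d :: s).Sublist (List.drop (p.length - num.toNat) p) := by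
      have : List.drop (p.length - num.toNat) p
          = List.drop (p.length - num.toNat) t' ++ (d :: s) := by
        rw [hpd]
        refine List.drop_append_of_le_length ?_
        simp only [List.length_append, List.length_cons]
        omega
      rw [this]; exact List.sublist_append_right _ _
    have := (hsub.nodup hnd)
    rw [List.nodup_cons] at this
    exact this.1 hdm
  have hlt := len_ofList_lt_of_not_nodup _ hnn
  have hlen2 : (List.drop (p.length - num.toNat) p).length = num.toNat := by
    rw [List.length_drop]; omega
  simp only [PySem.Set.len]
  omega

-- the simulation: A's state (p processed, window s = maximal distinct suffix of p) against
-- B's remaining candidate positions max(num, |p|), …, n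
lemma do_thing_go_eq (data : List Char) (num : Int) (h0 : 0 ≤ num) :
    ∀ (cs p s t : List Char),
      data = p ++ cs → p = t ++ s → s.Nodup →
      (s.length = p.length ∨ ∃ (t' : List Char) (d : Char), p = t' ++ d :: s ∧ d ∈ s) →
      (s.length : Int) ≤ num →
      do_thing_go num cs (p.length : Int) s
        = do_thing_alt_go data num (data.length : Int)
            (PySem.List.pyRange (max num (p.length : Int)) ((data.length : Int) + 1) 1) := by
  intro cs
  induction cs with
  | nil =>
    intro p s t hdata hps hnd hmax hlen
    have hp : data = p := by simpa using hdata
    subst hp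
    by_cases hn : num ≤ (data.length : Int)
    · rw [max_eq_right hn, PySem.List.pyRange_one_singleton]
      simp only [do_thing_go, do_thing_alt_go]
      split <;> rfl
    · rw [max_eq_left (by omega), PySem.List.pyRange_one_eq_nil (by omega)]
      simp [do_thing_go, do_thing_alt_go]
  | cons c rest ih =>
    intro p s t hdata hps hnd hmax hlen
    have hplen : p.length = t.length + s.length := by rw [hps]; simp
    have hdlen : data.length = p.length + rest.length + 1 := by rw [hdata]; simp; omega
    simp only [do_thing_go]
    by_cases hbreak : (s.length : Int) = num
    · rw [if_pos hbreak]
      have hni : num ≤ (p.length : Int) := by omega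
      rw [max_eq_right hni, PySem.List.pyRange_one_cons (by omega), do_thing_alt_go]
      have hslice : PySem.List.slice data (some ((p.length : Int) - num))
          (some (p.length : Int)) = s := by
        have hin : (p.length : Int) - num = ((t.length : Nat) : Int) := by omega
        have hb : (p.length : Int) = ((p.length : Nat) : Int) := rfl
        rw [hin, hb, PySem.List.slice_natCast]
        have hd2 : List.drop t.length data = s ++ (c :: rest) := by
          rw [hdata, hps, List.append_assoc, List.drop_left]
        have htk : p.length - t.length = s.length := by omega
        rw [hd2, htk, List.take_left]
      rw [if_pos (by rw [hslice, PySem.Set.ofList_eq_self_of_nodup s hnd]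
                     simpa [PySem.Set.len] using hbreak)]
    · rw [if_neg hbreak]
      have hslen : (s.length : Int) < num := lt_of_le_of_ne hlen hbreak
      -- B skips candidate p.length (when it is one): its window is not distinct
      have hshift : do_thing_alt_go data num (data.length : Int)
            (PySem.List.pyRange (max num (p.length : Int)) ((data.length : Int) + 1) 1)
          = do_thing_alt_go data num (data.length : Int)
            (PySem.List.pyRange (max num ((p.length : Int) + 1)) ((data.length : Int) + 1) 1) := by
        by_cases hni : num ≤ (p.length : Int)
        · obtain ⟨t', d, hpd, hdm⟩ : ∃ t' d, p = t' ++ d :: s ∧ d ∈ s := by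
            rcases hmax with hl | hr
            · exfalso; omega
            · exact hr
          rw [max_eq_right hni, max_eq_right (by omega)]
          exact alt_go_shift data num _ _
            (cond_false_at data p s (c :: rest) t' d num hdata hpd hdm h0 hni hslen)
            (by omega)
        · rw [max_eq_left (by omega), max_eq_left (by omega)]
      rw [hshift]
      by_cases hc : s.contains c
      · -- c in s: the window restarts right after c's earlier occurrence
        have hcm : c ∈ s := by simpa using hc
        obtain ⟨k, hk⟩ := Option.isSome_iff_exists.mp
          ((PySem.List.index?_isSome_iff s c).mpr hcm)
        obtain ⟨hklt, hkc, _⟩ := PySem.List.getElem_of_index?_eq_some hk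
        rw [if_pos hc, hk]
        have hms : (match some k with
            | some k => PySem.List.slice s (some ((k : Int) + 1)) none
            | none => s) = PySem.List.slice s (some ((k : Int) + 1)) none := rfl
        rw [hms]
        have hc1 : (k : Int) + 1 = ((k + 1 : Nat) : Int) := by push_cast; ring
        rw [hc1, PySem.List.slice_from_natCast]
        have hsplit : s = List.take k s ++ c :: List.drop (k + 1) s := by
          conv_lhs => rw [← List.take_append_drop k s, List.drop_eq_getElem_cons hklt, hkc]
        have hnotin : c ∉ List.drop (k + 1) s := by
          have hnd2 : (c :: List.drop (k + 1) s).Nodup := by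
            rw [hsplit] at hnd
            exact hnd.of_append_right
          exact (List.nodup_cons.mp hnd2).1
        have hnd1 : (List.drop (k + 1) s ++ [c]).Nodup := by
          have hdk : (List.drop (k + 1) s).Nodup := ((List.drop_sublist _ _).nodup hnd)
          exact ((List.perm_append_singleton c _).nodup_iff).mpr
            (List.nodup_cons.mpr ⟨hnotin, hdk⟩)
        have hIH := ih (p ++ [c]) (List.drop (k + 1) s ++ [c]) (t ++ List.take (k + 1) s)
          (by rw [hdata]; simp)
          (by rw [hps, List.append_assoc]
              conv_rhs => rw [List.append_assoc, ← List.append_assoc (List.take (k + 1) s),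
                List.take_append_drop])
          hnd1
          (Or.inr ⟨t ++ List.take k s, c,
            by conv_lhs => rw [hps, hsplit]
               simp,
            by simp⟩)
          (by simp only [List.length_append, List.length_drop, List.length_cons,
                List.length_nil]
              omega)
        have hc2 : (((p ++ [c]).length : Nat) : Int) = (p.length : Int) + 1 := by simp
        rw [hc2] at hIH
        exact hIH
      · -- c not in s: the window extends
        have hcm : c ∉ s := by simpa using hc
        rw [if_neg hc]
        have hnd1 : (s ++ [c]).Nodup := ((List.perm_append_singleton c _).nodup_iff).mpr
          (List.nodup_cons.mpr ⟨hcm, hnd⟩)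
        have hIH := ih (p ++ [c]) (s ++ [c]) t
          (by rw [hdata]; simp)
          (by rw [hps]; simp)
          hnd1
          (by rcases hmax with hl | ⟨t', d, hpd, hdm⟩
              · left; simp [hl]
              · right; exact ⟨t', d, by rw [hpd]; simp, by simp [hdm]⟩)
          (by simp only [List.length_append, List.length_cons, List.length_nil]
              push_cast; omega)
        have hc2 : (((p ++ [c]).length : Nat) : Int) = (p.length : Int) + 1 := by simp
        rw [hc2] at hIH
        exact hIH

-- ===== VERDICT (by name: the statement is the Claim_ definition above) =====
theorem do_thing_spec : Claim_equal_do_thing := by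
  intro data num _dom
  unfold Spec_do_thing do_thing do_thing_alt
  rw [PySem.Str.len_eq]
  by_cases h0 : 0 ≤ num
  · have h := do_thing_go_eq data.toList num h0 data.toList [] [] [] (by simp) rfl
      (by simp) (Or.inl rfl) (by simpa using h0)
    simp only [List.length_nil, Nat.cast_zero] at h
    rw [max_eq_left h0] at h
    rw [show max num 0 = num from max_eq_left h0]
    exact h
  · rw [do_thing_alt_go_neg _ _ _ (by omega)]
    simpa using do_thing_go_neg num (by omega) data.toList 0 []
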